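-- pv_equiv track=rewrite | github.com/pep8speaks/reacnetgenerator | ReacNetGenerator.py | getatomroute
-- ===== SOURCE A (Python) =====
-- def getatomroute(item):
--     itemi,parameter=item
--     i,(atomeachi,atomtypei)=itemi
--     step,atomname,mname,timestep=parameter
--     route=[]
--     routestrarr=[]
--     moleculeroute=[]
--     molecule=-1
--     right=-1
--     for j in range(0,step):
--         if atomeachi[j]>0 and atomeachi[j]!=molecule:
--             routestrarr.append(mname[atomeachi[j]-1] + " ("+ str(atomeachi[j])+" step "+str(timestep[j])+")")
--             left=right
--             molecule=atomeachi[j]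
--             right=molecule
--             if left>=0 and not (left,right) in moleculeroute:
--                 moleculeroute.append((left,right))
--     routestr="Atom "+str(i)+" "+atomname[atomtypei-1]+": "+" -> ".join(routestrarr)
--     return moleculeroute,routestr
-- ===== SOURCE B (Python) =====
-- def _nub(pairs):
--     # first-occurrence dedup by recursion: keep the head, strip its later
--     # duplicates from the rest, recurse
--     if not pairs:
--         return []
--     head = pairs[0]
--     return [head] + _nub([p for p in pairs[1:] if p != head])
--
--
-- def getatomroute(item):
--     (i, (atomeachi, atomtypei)), (step, atomname, mname, timestep) = item
--     # stage 1: all positive entries with their timesteps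
--     positives = [(atomeachi[j], timestep[j]) for j in range(step) if atomeachi[j] > 0]
--     # stage 2: compress adjacent runs of equal molecules (keep the first of each run)
--     events = positives[:1] + [cur for prv, cur in zip(positives, positives[1:]) if cur[0] != prv[0]]
--     routestrarr = ["%s (%d step %d)" % (mname[m - 1], m, t) for m, t in events]
--     mols = [m for m, _ in events]
--     # stage 3: consecutive molecule pairs, deduped recursively keeping first occurrences
--     moleculeroute = _nub(list(zip(mols, mols[1:])))
--     routestr = "Atom %d %s: %s" % (i, atomname[atomtypei - 1], " -> ".join(routestrarr))
--     return moleculeroute, routestr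
-- ===== Notes on version B (the rewrite author's own statement) =====
-- stated objective: alternative
-- what changed: Replaces A's single stateful loop (four mutable variables interleaving formatting with pair dedup) by a declarative staged pipeline with no accumulator: filter the positive entries, compress adjacent equal-molecule runs, format, pair consecutive molecules, and dedup the pairs with a recursive nub that strips later duplicates of the head before recursing.
import Mathlib
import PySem

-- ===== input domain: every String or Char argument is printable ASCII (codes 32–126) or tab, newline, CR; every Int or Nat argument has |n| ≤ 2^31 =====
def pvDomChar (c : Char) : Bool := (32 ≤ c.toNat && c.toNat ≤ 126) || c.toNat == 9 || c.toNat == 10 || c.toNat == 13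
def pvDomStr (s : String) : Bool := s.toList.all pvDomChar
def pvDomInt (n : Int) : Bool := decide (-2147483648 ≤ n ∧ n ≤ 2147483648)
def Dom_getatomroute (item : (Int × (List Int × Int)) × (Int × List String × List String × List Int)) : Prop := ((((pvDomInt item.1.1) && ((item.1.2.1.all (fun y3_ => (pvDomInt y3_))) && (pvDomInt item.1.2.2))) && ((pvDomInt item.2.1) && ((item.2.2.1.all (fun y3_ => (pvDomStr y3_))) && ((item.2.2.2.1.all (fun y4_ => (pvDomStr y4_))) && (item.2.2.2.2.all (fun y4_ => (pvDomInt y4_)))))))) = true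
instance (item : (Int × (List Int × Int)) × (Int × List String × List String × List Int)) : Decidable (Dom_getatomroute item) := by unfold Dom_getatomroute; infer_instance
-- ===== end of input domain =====

-- B replaces A's single stateful loop by a declarative staged pipeline (filter positives,
-- compress adjacent runs, format, pair, recursive nub); objective: alternative, same cost.

-- ===== PORT A =====
-- loop body of A's for-loop, as a named helper (state: routestrarr, moleculeroute, molecule, right)
def pvStepA (atomeachi timestep : List Int) (mname : List String)
    (s : List String × List (Int × Int) × Int × Int) (j : Int) :
    List String × List (Int × Int) × Int × Int :=
  let routestrarr := s.1; let moleculeroute := s.2.1; let molecule := s.2.2.1; let right := s.2.2.2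
  let aj := (PySem.List.pyGet? atomeachi j).getD 0
  if aj > 0 ∧ aj ≠ molecule then
    let routestrarr := routestrarr ++
      [((PySem.List.pyGet? mname (aj - 1)).getD "") ++ " (" ++ PySem.Int.toStr aj ++
       " step " ++ PySem.Int.toStr ((PySem.List.pyGet? timestep j).getD 0) ++ ")"]
    let left := right
    let molecule := aj
    let right := molecule
    let moleculeroute :=
      if left ≥ 0 ∧ ¬ (left, right) ∈ moleculeroute then moleculeroute ++ [(left, right)]
      else moleculeroute
    (routestrarr, moleculeroute, molecule, right)
  else s

def getatomroute (item : (Int × (List Int × Int)) × (Int × List String × List String × List Int)) : (List (Int × Int)) × String :=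
  let itemi := item.1; let parameter := item.2
  let i := itemi.1; let atomeachi := itemi.2.1; let atomtypei := itemi.2.2
  let step := parameter.1; let atomname := parameter.2.1
  let mname := parameter.2.2.1; let timestep := parameter.2.2.2
  let st := (PySem.List.pyRange 0 step 1).foldl (pvStepA atomeachi timestep mname) ([], [], -1, -1)
  let routestr := "Atom " ++ PySem.Int.toStr i ++ " " ++
      ((PySem.List.pyGet? atomname (atomtypei - 1)).getD "") ++ ": " ++ PySem.Str.join " -> " st.1
  (st.2.1, routestr)

-- ===== PORT B =====
-- body of B's 'positives' comprehension (filter + project in one filterMap)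
def pvPosFn (atomeachi timestep : List Int) (j : Int) : Option (Int × Int) :=
  let m := (PySem.List.pyGet? atomeachi j).getD 0
  if m > 0 then some (m, (PySem.List.pyGet? timestep j).getD 0) else none

-- body of B's run-compression comprehension: keep cur if its molecule differs from prv's
def pvChg (pc : (Int × Int) × (Int × Int)) : Option (Int × Int) :=
  if pc.2.1 ≠ pc.1.1 then some pc.2 else none

-- B's "%s (%d step %d)" formatting of one event
def pvFmtB (mname : List String) (e : Int × Int) : String :=
  ((PySem.List.pyGet? mname (e.1 - 1)).getD "") ++ " (" ++ PySem.Int.toStr e.1 ++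
  " step " ++ PySem.Int.toStr e.2 ++ ")"

-- B's recursive first-occurrence dedup: keep the head, strip its duplicates, recurse
def pvNub : List (Int × Int) → List (Int × Int)
  | [] => []
  | x :: xs => x :: pvNub (xs.filter (fun p => p ≠ x))
termination_by l => l.length
decreasing_by
  simp only [List.length_cons, List.length_unattach]
  exact Nat.lt_succ_of_le (le_trans (List.length_filter_le _ _) (by simp))

def getatomroute_alt (item : (Int × (List Int × Int)) × (Int × List String × List String × List Int)) : (List (Int × Int)) × String :=
  let itemi := item.1; let parameter := item.2
  let i := itemi.1; let atomeachi := itemi.2.1; let atomtypei := itemi.2.2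
  let step := parameter.1; let atomname := parameter.2.1
  let mname := parameter.2.2.1; let timestep := parameter.2.2.2
  let positives := (PySem.List.pyRange 0 step 1).filterMap (pvPosFn atomeachi timestep)
  let events := PySem.List.slice positives none (some 1) ++
      (positives.zip (PySem.List.slice positives (some 1) none)).filterMap pvChg
  let routestrarr := events.map (pvFmtB mname)
  let mols := events.map Prod.fst
  let moleculeroute := pvNub (mols.zip (PySem.List.slice mols (some 1) none))
  let routestr := "Atom " ++ PySem.Int.toStr i ++ " " ++
      ((PySem.List.pyGet? atomname (atomtypei - 1)).getD "") ++ ": " ++ PySem.Str.join " -> " routestrarr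
  (moleculeroute, routestr)

-- ===== PRECONDITION & SPEC =====
-- Pre_ excludes exactly the inputs where one of the two Pythons raises IndexError
-- (atomeachi/timestep shorter than step, an mname lookup out of range, or
-- atomname[atomtypei-1] out of range); the timestep bound is slightly wider than A's raise
-- set: A reads timestep[j] only at change events, B at every positive entry (see cites).
def Pre_getatomroute (item : (Int × (List Int × Int)) × (Int × List String × List String × List Int)) : Prop :=
  item.2.1 ≤ (item.1.2.1.length : Int) ∧
  item.2.1 ≤ (item.2.2.2.2.length : Int) ∧
  (∀ m ∈ item.1.2.1.take item.2.1.toNat, 0 < m → m ≤ (item.2.2.2.1.length : Int)) ∧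
  PySem.Raise.InRange item.2.2.1.length (item.1.2.2 - 1)
instance (item : (Int × (List Int × Int)) × (Int × List String × List String × List Int)) : Decidable (Pre_getatomroute item) := by unfold Pre_getatomroute; infer_instance

def pvWitness_getatomroute : ((Int × (List Int × Int)) × (Int × List String × List String × List Int)) :=
  ((3, ([1, 2, 2, 1], 1)), (4, ["C"], ["H2O", "CO2"], [0, 1, 2, 3]))

def Spec_getatomroute (item : (Int × (List Int × Int)) × (Int × List String × List String × List Int)) (out : (List (Int × Int)) × String) : Prop := out = getatomroute_alt item
instance (item : (Int × (List Int × Int)) × (Int × List String × List String × List Int)) (out : (List (Int × Int)) × String) : Decidable (Spec_getatomroute item out) := by unfold Spec_getatomroute; infer_instance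

-- ===== CLAIM =====
def Claim_equal_getatomroute : Prop := ∀ (item : (Int × (List Int × Int)) × (Int × List String × List String × List Int)), Dom_getatomroute item → Pre_getatomroute item → Spec_getatomroute item (getatomroute item)

-- ===== LEMMAS AND PROOFS =====

-- proof-side intermediate: the event-collecting fold over index j (A's loop, stripped of output)
def pvStepB (atomeachi timestep : List Int)
    (s : List (Int × Int) × Int) (j : Int) : List (Int × Int) × Int :=
  let m := (PySem.List.pyGet? atomeachi j).getD 0
  if m > 0 ∧ m ≠ s.2 then (s.1 ++ [(m, (PySem.List.pyGet? timestep j).getD 0)], m) else s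

-- the same fold over the already-filtered (molecule, timestep) list
def pvStepE (s : List (Int × Int) × Int) (mt : Int × Int) : List (Int × Int) × Int :=
  if mt.1 ≠ s.2 then (s.1 ++ [mt], mt.1) else s

-- A's accumulator-style dedup of the consecutive-molecule pairs
def pvDedup (mols : List Int) : List (Int × Int) :=
  (mols.zip mols.tail).foldl (fun acc p => if p ∈ acc then acc else acc ++ [p]) []

-- molecule of the last event after folding rest from seed event p
def pvLastF : Int × Int → List (Int × Int) → Int
  | p, [] => p.1
  | _, c :: r => pvLastF c r

-- appending a molecule to a nonempty trajectory adds exactly one consecutive pair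
lemma pairs_append (mols : List Int) (m p : Int) (h : mols.getLast? = some p) :
    (mols ++ [m]).zip (mols ++ [m]).tail = mols.zip mols.tail ++ [(p, m)] := by
  induction mols with
  | nil => simp at h
  | cons a r ih =>
    cases r with
    | nil => simp_all
    | cons b r' =>
      have h' : (b :: r').getLast? = some p := by simpa using h
      have := ih h'
      simpa using this

-- effect of one more molecule on A's deduped pair list
lemma pvDedup_append_last (mols : List Int) (m p : Int) (h : mols.getLast? = some p) :
    pvDedup (mols ++ [m])
      = if (p, m) ∈ pvDedup mols then pvDedup mols else pvDedup mols ++ [(p, m)] := by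
  unfold pvDedup
  rw [pairs_append mols m p h, List.foldl_append]
  simp only [List.foldl_cons, List.foldl_nil]

-- the loop invariant relating A's quadruple state to the (events, prev) state
def pvInv (evs : List (Int × Int)) (prev : Int) : Prop :=
  (prev = -1 ∧ evs = []) ∨ (0 ≤ prev ∧ (evs.map Prod.fst).getLast? = some prev)

-- A's loop equals the event-collecting fold followed by formatting and pair dedup
lemma loop_eq (atomeachi timestep : List Int) (mname : List String) (L : List Int) :
    ∀ (evs : List (Int × Int)) (prev : Int), pvInv evs prev →
    L.foldl (pvStepA atomeachi timestep mname)
        (evs.map (pvFmtB mname), pvDedup (evs.map Prod.fst), prev, prev)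
      = ((L.foldl (pvStepB atomeachi timestep) (evs, prev)).1.map (pvFmtB mname),
         pvDedup ((L.foldl (pvStepB atomeachi timestep) (evs, prev)).1.map Prod.fst),
         (L.foldl (pvStepB atomeachi timestep) (evs, prev)).2,
         (L.foldl (pvStepB atomeachi timestep) (evs, prev)).2) := by
  induction L with
  | nil => intro evs prev _; simp
  | cons j L ih =>
    intro evs prev hinv
    simp only [List.foldl_cons]
    by_cases hc : ((PySem.List.pyGet? atomeachi j).getD 0) > 0 ∧
                  ((PySem.List.pyGet? atomeachi j).getD 0) ≠ prev
    · set m := (PySem.List.pyGet? atomeachi j).getD 0 with hm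
      set t := (PySem.List.pyGet? timestep j).getD 0 with ht
      have hA : pvStepA atomeachi timestep mname
          (evs.map (pvFmtB mname), pvDedup (evs.map Prod.fst), prev, prev) j
        = ((evs ++ [(m, t)]).map (pvFmtB mname),
           pvDedup ((evs ++ [(m, t)]).map Prod.fst), m, m) := by
        have hdd : (if prev ≥ 0 ∧ ¬ (prev, m) ∈ pvDedup (evs.map Prod.fst)
                    then pvDedup (evs.map Prod.fst) ++ [(prev, m)]
                    else pvDedup (evs.map Prod.fst))
            = pvDedup (evs.map Prod.fst ++ [m]) := by
          rcases hinv with ⟨hp, he⟩ | ⟨hp, hl⟩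
          · subst he; simp [pvDedup, hp]
          · rw [pvDedup_append_last (evs.map Prod.fst) m prev hl]
            by_cases hmem : (prev, m) ∈ pvDedup (evs.map Prod.fst)
            · simp [hmem, hp]
            · simp [hmem, hp]
        simp only [pvStepA, ← hm, ← ht, if_pos hc, pvFmtB, List.map_append, List.map_cons,
          List.map_nil]
        rw [← hdd]
      have hB : pvStepB atomeachi timestep (evs, prev) j = (evs ++ [(m, t)], m) := by
        simp [pvStepB, ← hm, ← ht, if_pos hc]
      rw [hA, hB]
      apply ih
      right
      exact ⟨le_of_lt hc.1, by simp⟩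
    · have hA : pvStepA atomeachi timestep mname
          (evs.map (pvFmtB mname), pvDedup (evs.map Prod.fst), prev, prev) j
        = (evs.map (pvFmtB mname), pvDedup (evs.map Prod.fst), prev, prev) := by
        simp [pvStepA, hc]
      have hB : pvStepB atomeachi timestep (evs, prev) j = (evs, prev) := by
        simp [pvStepB, hc]
      rw [hA, hB]
      exact ih evs prev hinv

-- the index fold equals the fold over B's filtered positives list
lemma stepB_eq_filterMap (atomeachi timestep : List Int) :
    ∀ (js : List Int) (s : List (Int × Int) × Int),
    js.foldl (pvStepB atomeachi timestep) s
      = (js.filterMap (pvPosFn atomeachi timestep)).foldl pvStepE s := by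
  intro js
  induction js with
  | nil => intro s; simp
  | cons j js ih =>
    intro s
    by_cases hm : ((PySem.List.pyGet? atomeachi j).getD 0) > 0
    · have hf : pvPosFn atomeachi timestep j
          = some ((PySem.List.pyGet? atomeachi j).getD 0,
                  (PySem.List.pyGet? timestep j).getD 0) := by
        simp [pvPosFn, hm]
      have hb : pvStepB atomeachi timestep s j
          = pvStepE s ((PySem.List.pyGet? atomeachi j).getD 0,
                       (PySem.List.pyGet? timestep j).getD 0) := by
        by_cases he : ((PySem.List.pyGet? atomeachi j).getD 0) = s.2
        · simp [pvStepB, pvStepE, he]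
        · simp [pvStepB, pvStepE, he, hm]
      simp only [List.foldl_cons, List.filterMap_cons, hf, hb, ih]
    · have hf : pvPosFn atomeachi timestep j = none := by simp [pvPosFn, hm]
      have hb : pvStepB atomeachi timestep s j = s := by simp [pvStepB, hm]
      simp only [List.foldl_cons, List.filterMap_cons, hf, hb, ih]

lemma pvLastF_congr (p q : Int × Int) (r : List (Int × Int)) (h : p.1 = q.1) :
    pvLastF p r = pvLastF q r := by
  cases r <;> simp [pvLastF, h]

lemma zip_chg_congr (p q : Int × Int) (r : List (Int × Int)) (h : p.1 = q.1) :
    ((p :: r).zip r).filterMap pvChg = ((q :: r).zip r).filterMap pvChg := by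
  cases r with
  | nil => simp
  | cons d r' => simp [List.zip_cons_cons, List.filterMap_cons, pvChg, h]

-- the event fold from a seeded nonempty state is exactly run compression of the rest
lemma stepE_destutter (rest : List (Int × Int)) :
    ∀ (evs : List (Int × Int)) (p : Int × Int),
    rest.foldl pvStepE (evs ++ [p], p.1)
      = (evs ++ [p] ++ ((p :: rest).zip rest).filterMap pvChg, pvLastF p rest) := by
  induction rest with
  | nil => intro evs p; simp [pvLastF]
  | cons c r ih =>
    intro evs p
    by_cases h : c.1 = p.1
    · have hs : pvStepE (evs ++ [p], p.1) c = (evs ++ [p], p.1) := by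
        simp [pvStepE, h]
      have hn : pvChg (p, c) = none := by simp [pvChg, h]
      simp only [List.foldl_cons, hs, ih evs p, List.zip_cons_cons, List.filterMap_cons, hn]
      rw [zip_chg_congr p c r h.symm, pvLastF_congr p c r h.symm]
      simp [pvLastF]
    · have hs : pvStepE (evs ++ [p], p.1) c = ((evs ++ [p]) ++ [c], c.1) := by
        simp [pvStepE, h]
      have hn : pvChg (p, c) = some c := by simp [pvChg, h]
      simp only [List.foldl_cons, hs, ih (evs ++ [p]) c, List.zip_cons_cons,
        List.filterMap_cons, hn]
      simp [pvLastF]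

-- from the empty state, the fold over a list of positive-molecule events is take 1 ++ compression
lemma stepE_eq_events (ps : List (Int × Int)) (hpos : ∀ x ∈ ps, 0 < x.1) :
    (ps.foldl pvStepE ([], -1)).1
      = ps.take 1 ++ (ps.zip ps.tail).filterMap pvChg := by
  cases ps with
  | nil => simp
  | cons p rest =>
    have hp : p.1 ≠ -1 := by
      have := hpos p (by simp); omega
    have hs : pvStepE ([], -1) p = (([] : List (Int × Int)) ++ [p], p.1) := by
      simp [pvStepE, hp]
    simp only [List.foldl_cons, hs, stepE_destutter rest [] p]
    simp

-- A's accumulator dedup equals B's recursive nub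
lemma foldl_dedup_eq_nub (xs : List (Int × Int)) :
    ∀ (acc : List (Int × Int)),
    xs.foldl (fun acc p => if p ∈ acc then acc else acc ++ [p]) acc
      = acc ++ pvNub (xs.filter (fun p => p ∉ acc)) := by
  induction xs with
  | nil => intro acc; simp [pvNub]
  | cons x xs ih =>
    intro acc
    by_cases hx : x ∈ acc
    · simp only [List.foldl_cons, if_pos hx, List.filter_cons]
      simp [hx, ih acc]
    · have h1 : (x :: xs).filter (fun p => p ∉ acc)
          = x :: xs.filter (fun p => p ∉ acc) := by simp [hx]
      rw [List.foldl_cons, if_neg hx, ih (acc ++ [x]), h1]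
      have h2 : pvNub (x :: xs.filter (fun p => p ∉ acc))
          = x :: pvNub ((xs.filter (fun p => p ∉ acc)).filter (fun p => p ≠ x)) := by
        simp [pvNub]
      rw [h2, List.filter_filter]
      have h3 : xs.filter (fun p => decide (p ∉ acc ++ [x]))
          = xs.filter (fun a => decide (a ≠ x) && decide (a ∉ acc)) := by
        apply List.filter_congr
        intro p _
        by_cases ha : p ∈ acc <;> by_cases hb : p = x <;> simp [ha, hb]
      rw [h3]
      simp

-- every entry of B's positives list has a positive molecule
lemma positives_pos (atomeachi timestep : List Int) (js : List Int) :
    ∀ x ∈ js.filterMap (pvPosFn atomeachi timestep), 0 < x.1 := by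
  intro x hx
  rcases List.mem_filterMap.mp hx with ⟨j, _, hj⟩
  unfold pvPosFn at hj
  by_cases hm : ((PySem.List.pyGet? atomeachi j).getD 0) > 0
  · simp only [hm, if_pos] at hj
    cases hj; simpa
  · simp [hm] at hj

-- ===== VERDICT =====
theorem getatomroute_spec : Claim_equal_getatomroute := by
  intro item _ _
  unfold Spec_getatomroute getatomroute getatomroute_alt
  dsimp only
  have h := loop_eq item.1.2.1 item.2.2.2.2 item.2.2.2.1 (PySem.List.pyRange 0 item.2.1 1)
    [] (-1) (Or.inl ⟨rfl, rfl⟩)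
  simp only [List.map_nil] at h
  have h0 : pvDedup (([] : List (Int × Int)).map Prod.fst) = [] := by simp [pvDedup]
  rw [List.map_nil] at h0
  rw [h0] at h
  rw [h]
  -- identify A's event list with B's staged events
  set ps := (PySem.List.pyRange 0 item.2.1 1).filterMap (pvPosFn item.1.2.1 item.2.2.2.2) with hps
  have hE : ((PySem.List.pyRange 0 item.2.1 1).foldl
      (pvStepB item.1.2.1 item.2.2.2.2) ([], -1)).1
      = ps.take 1 ++ (ps.zip ps.tail).filterMap pvChg := by
    rw [stepB_eq_filterMap, ← hps]
    exact stepE_eq_events ps (positives_pos _ _ _)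
  have hsl1 : PySem.List.slice ps none (some 1) = ps.take 1 := by
    have := PySem.List.slice_to_natCast (xs := ps) (b := 1)
    simpa using this
  have hsl2 : PySem.List.slice ps (some 1) none = ps.tail := PySem.List.slice_from_one ps
  rw [hsl1, hsl2]
  set evts := ps.take 1 ++ (ps.zip ps.tail).filterMap pvChg with hevts
  rw [hE]
  -- identify the dedup of the pair lists
  have hsl3 : PySem.List.slice (evts.map Prod.fst) (some 1) none = (evts.map Prod.fst).tail :=
    PySem.List.slice_from_one _
  rw [hsl3]
  have hded : pvDedup (evts.map Prod.fst)
      = pvNub ((evts.map Prod.fst).zip (evts.map Prod.fst).tail) := by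
    unfold pvDedup
    rw [foldl_dedup_eq_nub]
    simp
  rw [hded]
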